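-- pv_equiv track=rewrite | github.com/innocentdevil11/MindMate | backend/graph/nodes.py | _extract_memory_labels
-- ===== SOURCE A (Python) =====
-- def _extract_memory_labels(memory_context: str) -> list[str]:
--     """Extract memory labels from the formatted context string."""
--     labels = []
--     for line in memory_context.split("\n"):
--         # Format: "- [type] label: content (confidence: X%)"
--         if line.startswith("- ["):
--             try:
--                 after_bracket = line.split("] ", 1)[1]
--                 label = after_bracket.split(":")[0].strip()
--                 labels.append(label)
--             except (IndexError, ValueError):
--                 continue
--     return labels
-- ===== SOURCE B (Python) =====
-- def _extract_memory_labels(memory_context: str) -> list[str]: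
--     """Extract memory labels from the formatted context string."""
--     # Character-level state machine (one pass over the characters, no line
--     # splitting and no per-line string operations):
--     #   0,1,2: matching the "- [" line prefix   3: seeking ']'   4: saw ']', need ' '
--     #   5: collecting label chars               6: skipping the rest of the line
--     labels = []
--     prefix = "- ["
--     state = 0
--     buf = []
--     for ch in memory_context + "\n":
--         if ch == "\n":
--             if state == 5:
--                 labels.append("".join(buf).strip())
--             state = 0
--             buf = []
--         elif state < 3:
--             state = state + 1 if ch == prefix[state] else 6
--         elif state == 3:
--             if ch == "]":
--                 state = 4
--         elif state == 4:
--             if ch == " ":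
--                 state = 5
--             elif ch != "]":
--                 state = 3
--         elif state == 5:
--             if ch == ":":
--                 labels.append("".join(buf).strip())
--                 state = 6
--             else:
--                 buf.append(ch)
--     return labels
-- ===== Notes on version B (the rewrite author's own statement) =====
-- stated objective: alternative
-- what changed: Replaces the split-into-lines loop with per-line separator splits and try/except by a single character-level finite state machine folded over the string plus a sentinel newline: states recognise the dash-bracket line prefix, the first bracket-space separator and the first colon one character at a time while label characters accumulate in a buffer.
import Mathlib
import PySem

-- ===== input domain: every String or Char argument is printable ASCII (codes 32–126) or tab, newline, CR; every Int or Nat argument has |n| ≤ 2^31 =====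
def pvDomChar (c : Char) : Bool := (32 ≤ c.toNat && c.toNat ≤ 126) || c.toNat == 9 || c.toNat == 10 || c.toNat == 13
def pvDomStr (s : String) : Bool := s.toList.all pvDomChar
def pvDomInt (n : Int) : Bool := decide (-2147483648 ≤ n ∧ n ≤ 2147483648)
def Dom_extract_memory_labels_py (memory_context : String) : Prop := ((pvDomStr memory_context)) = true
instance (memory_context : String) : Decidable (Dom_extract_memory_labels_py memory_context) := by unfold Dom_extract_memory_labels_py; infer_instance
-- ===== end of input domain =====

-- B replaces A's split-into-lines loop with per-line split/try-except slicing by a single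
-- character-level finite state machine folded over the string (alternative; same cost).

-- ===== PORT A =====
def extract_memory_labels_py (memory_context : String) : List String :=
  ((PySem.Str.split? memory_context "\n").getD []).foldl (fun labels line =>
    if PySem.Str.startswith line "- [" then
      -- after_bracket = line.split("] ", 1)[1]; IndexError is caught → continue
      match PySem.List.pyGet? ((PySem.Str.splitMax? line "] " 1).getD []) 1 with
      | none => labels
      | some after_bracket =>
        -- label = after_bracket.split(":")[0].strip()  ([0] of a split result cannot raise)
        match PySem.List.pyGet? ((PySem.Str.split? after_bracket ":").getD []) 0 with
        | none => labels
        | some first => labels ++ [PySem.Str.strip first]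
    else labels) []

-- ===== PORT B =====
-- Source B's per-character transition: state 0,1,2 = matching the "- [" prefix, 3 = seeking ']',
-- 4 = saw ']' and need ' ', 5 = collecting label chars, 6 = skipping the rest of the line;
-- "".join(buf).strip() is String.ofList / PySem.Chars.strip; prefix[state] is getD on "- [".
def pvStep (acc : Nat × List Char × List String) (ch : Char) : Nat × List Char × List String :=
  match acc with
  | (state, buf, labels) =>
    if ch = '\n' then
      (0, [], if state = 5 then labels ++ [String.ofList (PySem.Chars.strip buf)] else labels)
    else if state < 3 then
      (if ch = ['-', ' ', '['].getD state ' ' then state + 1 else 6, buf, labels)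
    else if state = 3 then
      (if ch = ']' then 4 else 3, buf, labels)
    else if state = 4 then
      (if ch = ' ' then 5 else if ch ≠ ']' then 3 else 4, buf, labels)
    else if state = 5 then
      if ch = ':' then (6, buf, labels ++ [String.ofList (PySem.Chars.strip buf)])
      else (5, buf ++ [ch], labels)
    else (state, buf, labels)

def extract_memory_labels_py_alt (memory_context : String) : List String :=
  ((memory_context.toList ++ ['\n']).foldl pvStep (0, [], [])).2.2

-- ===== PRECONDITION & SPEC =====
def Spec_extract_memory_labels_py (memory_context : String) (out : List String) : Prop := out = extract_memory_labels_py_alt memory_context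
instance (memory_context : String) (out : List String) : Decidable (Spec_extract_memory_labels_py memory_context out) := by unfold Spec_extract_memory_labels_py; infer_instance

-- ===== CLAIM (what is proved, stated in full; the proofs are below) =====
def Claim_equal_extract_memory_labels_py : Prop := ∀ (memory_context : String), Dom_extract_memory_labels_py memory_context → Spec_extract_memory_labels_py memory_context (extract_memory_labels_py memory_context)

-- ===== LEMMAS AND PROOFS =====

-- split of a list by a nonempty separator, stated as find-directed recursion
def pvSplit (sep l : List Char) : List (List Char) :=
  if h : PySem.Chars.find l sep = -1 ∨ sep = [] then [l]
  else
    (l.take (PySem.Chars.find l sep).toNat) ::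
      pvSplit sep (l.drop ((PySem.Chars.find l sep).toNat + sep.length))
termination_by l.length
decreasing_by
  rw [not_or] at h
  obtain ⟨h1, h2⟩ := h
  have h0 : 0 ≤ PySem.Chars.find l sep := by
    have := PySem.Chars.neg_one_le_find l sep; omega
  have hsp := (PySem.Chars.find_spec (s := l) (sub := sep) h0).1
  have hle : sep.length ≤ (List.drop (PySem.Chars.find l sep).toNat l).length := hsp.length_le
  rw [List.length_drop] at hle
  have hpos : 0 < sep.length := List.length_pos_of_ne_nil h2
  simp only [List.length_drop]
  omega

def pvMapHead (f : List Char → List Char) : List (List Char) → List (List Char)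
  | [] => []
  | x :: xs => f x :: xs

theorem pvSplit_ne_nil (sep l : List Char) : pvSplit sep l ≠ [] := by
  unfold pvSplit; split <;> simp

theorem pvGo_nil (sub : List Char) (k : Nat) :
    PySem.Chars.find.go sub [] k = if sub.isEmpty then (k : Int) else -1 := by
  rw [PySem.Chars.find.go.eq_def]

theorem pvGo_cons (sub : List Char) (c : Char) (t : List Char) (k : Nat) :
    PySem.Chars.find.go sub (c :: t) k =
      if sub.isPrefixOf (c :: t) then (k : Int) else PySem.Chars.find.go sub t (k + 1) := by
  rw [PySem.Chars.find.go.eq_def]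

theorem pvFind_go_shift (sub l : List Char) (k : Nat) :
    PySem.Chars.find.go sub l k =
      if PySem.Chars.find.go sub l 0 = -1 then -1 else k + PySem.Chars.find.go sub l 0 := by
  induction l generalizing k with
  | nil =>
    rw [pvGo_nil, pvGo_nil]
    split <;> simp
  | cons c t ih =>
    have hge : -1 ≤ PySem.Chars.find.go sub t 0 := by
      have := PySem.Chars.neg_one_le_find t sub
      unfold PySem.Chars.find at this
      exact this
    rw [pvGo_cons, pvGo_cons, ih (k + 1), ih 1]
    clear ih
    split_ifs <;> omega

theorem pvFind_cons (sub : List Char) (c : Char) (rest : List Char) (hs : sub ≠ []) :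
    PySem.Chars.find (c :: rest) sub =
      if sub.isPrefixOf (c :: rest) then 0
      else if PySem.Chars.find rest sub = -1 then -1 else PySem.Chars.find rest sub + 1 := by
  unfold PySem.Chars.find
  rw [pvGo_cons]
  by_cases hp : sub.isPrefixOf (c :: rest) = true
  · simp [hp]
  · rw [pvFind_go_shift]
    have hge : -1 ≤ PySem.Chars.find.go sub rest 0 := by
      have := PySem.Chars.neg_one_le_find rest sub
      unfold PySem.Chars.find at this
      exact this
    simp only [hp]
    split_ifs <;> omega

theorem pvFind_nil (sub : List Char) (hs : sub ≠ []) : PySem.Chars.find [] sub = -1 := by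
  unfold PySem.Chars.find
  rw [pvGo_nil]
  simp [hs]

theorem pvSOgo_nil (sep : List Char) (fuel : Nat) (cur : List Char) (acc : List (List Char)) :
    PySem.Chars.splitOn.go sep fuel [] cur acc = acc.reverse ++ [cur.reverse] := by
  cases fuel <;> rw [PySem.Chars.splitOn.go.eq_def] <;> simp

theorem pvSOgo_cons (sep : List Char) (fuel : Nat) (c : Char) (rest cur : List Char) (acc : List (List Char)) :
    PySem.Chars.splitOn.go sep (fuel + 1) (c :: rest) cur acc =
      if sep.isPrefixOf (c :: rest) then
        PySem.Chars.splitOn.go sep fuel (List.drop sep.length (c :: rest)) [] (cur.reverse :: acc)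
      else PySem.Chars.splitOn.go sep fuel rest (c :: cur) acc := by
  rw [PySem.Chars.splitOn.go.eq_def]

theorem pvSplit_nil (sep : List Char) (hs : sep ≠ []) : pvSplit sep [] = [[]] := by
  unfold pvSplit
  rw [dif_pos (Or.inl (pvFind_nil sep hs))]

theorem pvSplit_neg (sep l : List Char) (hf : PySem.Chars.find l sep = -1) :
    pvSplit sep l = [l] := by
  conv_lhs => rw [pvSplit]
  rw [dif_pos (Or.inl hf)]

theorem pvSplit_pos (sep l : List Char) (hs : sep ≠ []) (hf : PySem.Chars.find l sep ≠ -1) :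
    pvSplit sep l =
      (l.take (PySem.Chars.find l sep).toNat) ::
        pvSplit sep (l.drop ((PySem.Chars.find l sep).toNat + sep.length)) := by
  conv_lhs => rw [pvSplit]
  rw [dif_neg (by tauto)]

theorem pvSplitOn_go (sep : List Char) (hs : sep ≠ []) :
    ∀ fuel (l : List Char), l.length ≤ fuel → ∀ cur acc,
      PySem.Chars.splitOn.go sep fuel l cur acc =
        acc.reverse ++ pvMapHead (cur.reverse ++ ·) (pvSplit sep l) := by
  have hsl : 0 < sep.length := List.length_pos_of_ne_nil hs
  intro fuel
  induction fuel with
  | zero =>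
    intro l hl cur acc
    have hnil : l = [] := List.eq_nil_of_length_eq_zero (by omega)
    subst hnil
    rw [pvSOgo_nil, pvSplit_nil sep hs]
    simp [pvMapHead]
  | succ fuel ih =>
    intro l hl cur acc
    cases l with
    | nil =>
      rw [pvSOgo_nil, pvSplit_nil sep hs]
      simp [pvMapHead]
    | cons c rest =>
      rw [pvSOgo_cons]
      have hf := pvFind_cons sep c rest hs
      by_cases hp : sep.isPrefixOf (c :: rest) = true
      · rw [if_pos hp]
        rw [ih (List.drop sep.length (c :: rest)) (by simp at hl ⊢; omega) [] (cur.reverse :: acc)]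
        rw [if_pos hp] at hf
        rw [pvSplit_pos sep (c :: rest) hs (by rw [hf]; omega), hf]
        simp [pvMapHead]
        cases pvSplit sep (List.drop sep.length (c :: rest)) <;> rfl
      · rw [if_neg hp]
        rw [ih rest (by simp at hl ⊢; omega) (c :: cur) acc]
        rw [if_neg hp] at hf
        by_cases hfr : PySem.Chars.find rest sep = -1
        · rw [pvSplit_neg sep rest hfr, pvSplit_neg sep (c :: rest) (by rw [hf]; simp [hfr])]
          simp [pvMapHead]
        · have hge := PySem.Chars.neg_one_le_find rest sep
          have hf' : PySem.Chars.find (c :: rest) sep = PySem.Chars.find rest sep + 1 := by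
            rw [hf]; simp [hfr]
          have ht : (PySem.Chars.find (c :: rest) sep).toNat = (PySem.Chars.find rest sep).toNat + 1 := by
            omega
          rw [pvSplit_pos sep rest hs hfr, pvSplit_pos sep (c :: rest) hs (by omega), ht]
          simp only [List.take_succ_cons, Nat.add_right_comm _ 1 sep.length]
          simp only [Nat.add_assoc, Nat.add_comm 1 sep.length]
          simp only [← Nat.add_assoc, List.drop_succ_cons]
          simp [pvMapHead]

theorem pvSplitOn_eq (sep l : List Char) (hs : sep ≠ []) :
    PySem.Chars.splitOn l sep = pvSplit sep l := by
  have := pvSplitOn_go sep hs (l.length + 1) l (by omega) [] []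
  unfold PySem.Chars.splitOn
  rw [this]
  obtain ⟨x, xs, hx⟩ : ∃ x xs, pvSplit sep l = x :: xs := by
    cases h : pvSplit sep l with
    | nil => exact absurd h (pvSplit_ne_nil sep l)
    | cons x xs => exact ⟨x, xs, rfl⟩
  simp [hx, pvMapHead]

theorem pvSMgo_nil (sep : List Char) (fuel m : Nat) (cur : List Char) (acc : List (List Char)) :
    PySem.Chars.splitOnMax.go sep fuel m [] cur acc = acc.reverse ++ [cur.reverse] := by
  cases fuel <;> rw [PySem.Chars.splitOnMax.go.eq_def] <;> simp

theorem pvSMgo_cons (sep : List Char) (fuel m : Nat) (c : Char) (rest cur : List Char) (acc : List (List Char)) :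
    PySem.Chars.splitOnMax.go sep (fuel + 1) m (c :: rest) cur acc =
      if m = 0 then ((cur.reverse ++ (c :: rest)) :: acc).reverse
      else if sep.isPrefixOf (c :: rest) then
        PySem.Chars.splitOnMax.go sep fuel (m - 1) (List.drop sep.length (c :: rest)) [] (cur.reverse :: acc)
      else PySem.Chars.splitOnMax.go sep fuel m rest (c :: cur) acc := by
  rw [PySem.Chars.splitOnMax.go.eq_def]

theorem pvSplitOnMax_go_zero (sep : List Char) (fuel : Nat) (l cur : List Char) (acc : List (List Char)) :
    PySem.Chars.splitOnMax.go sep fuel 0 l cur acc = acc.reverse ++ [cur.reverse ++ l] := by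
  cases fuel with
  | zero => rw [PySem.Chars.splitOnMax.go.eq_def]; simp
  | succ fuel =>
    cases l with
    | nil => rw [pvSMgo_nil]; simp
    | cons c rest => rw [pvSMgo_cons]; simp

theorem pvSplitOnMax_go_one (sep : List Char) (hs : sep ≠ []) (l : List Char) :
    ∀ fuel, l.length ≤ fuel → ∀ cur acc,
      PySem.Chars.splitOnMax.go sep fuel 1 l cur acc =
        acc.reverse ++ pvMapHead (cur.reverse ++ ·)
          (if PySem.Chars.find l sep = -1 then [l]
           else [l.take (PySem.Chars.find l sep).toNat,
                 l.drop ((PySem.Chars.find l sep).toNat + sep.length)]) := by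
  have hsl : 0 < sep.length := List.length_pos_of_ne_nil hs
  intro fuel
  induction fuel generalizing l with
  | zero =>
    intro hl cur acc
    have hnil : l = [] := List.eq_nil_of_length_eq_zero (by omega)
    subst hnil
    rw [pvSMgo_nil, pvFind_nil sep hs]
    simp [pvMapHead]
  | succ fuel ih =>
    intro hl cur acc
    cases l with
    | nil =>
      rw [pvSMgo_nil, pvFind_nil sep hs]
      simp [pvMapHead]
    | cons c rest =>
      rw [pvSMgo_cons, if_neg (by omega : ¬ (1 : Nat) = 0)]
      have hf := pvFind_cons sep c rest hs
      by_cases hp : sep.isPrefixOf (c :: rest) = true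
      · rw [if_pos hp]
        rw [if_pos hp] at hf
        rw [show (1 : Nat) - 1 = 0 from rfl, pvSplitOnMax_go_zero]
        rw [if_neg (by rw [hf]; omega), hf]
        simp [pvMapHead]
      · rw [if_neg hp]
        rw [ih rest (by simp at hl ⊢; omega) (c :: cur) acc]
        rw [if_neg hp] at hf
        by_cases hfr : PySem.Chars.find rest sep = -1
        · rw [if_pos hfr, if_pos (by rw [hf]; simp [hfr])]
          simp [pvMapHead]
        · have hge := PySem.Chars.neg_one_le_find rest sep
          have hf' : PySem.Chars.find (c :: rest) sep = PySem.Chars.find rest sep + 1 := by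
            rw [hf]; simp [hfr]
          have ht : (PySem.Chars.find (c :: rest) sep).toNat = (PySem.Chars.find rest sep).toNat + 1 := by
            omega
          rw [if_neg hfr, if_neg (by omega), ht]
          simp only [List.take_succ_cons, Nat.add_right_comm _ 1 sep.length]
          simp only [Nat.add_assoc, Nat.add_comm 1 sep.length]
          simp only [← Nat.add_assoc, List.drop_succ_cons]
          simp [pvMapHead]

theorem pvSplitOnMax_one (sep l : List Char) (hs : sep ≠ []) :
    PySem.Chars.splitOnMax l sep 1 =
      if PySem.Chars.find l sep = -1 then [l]
      else [l.take (PySem.Chars.find l sep).toNat,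
            l.drop ((PySem.Chars.find l sep).toNat + sep.length)] := by
  unfold PySem.Chars.splitOnMax
  rw [if_neg (by omega : ¬ (1 : Int) < 0)]
  rw [show Int.toNat 1 = 1 from rfl]
  rw [pvSplitOnMax_go_one sep hs l (l.length + 1) (by omega) [] []]
  split <;> simp [pvMapHead]

-- "up to the first colon" and the label it produces
def pvTuc (u : List Char) : List Char :=
  if PySem.Chars.find u [':'] = -1 then u else u.take (PySem.Chars.find u [':']).toNat

def pvLab (u : List Char) : String := String.ofList (PySem.Chars.strip u)

-- the per-line processing both programs perform, in A's phrasing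
def pvProcA (line : List Char) (labels : List String) : List String :=
  if PySem.Chars.startswith line ['-', ' ', '['] then
    let k := PySem.Chars.find line [']', ' ']
    if k = -1 then labels
    else labels ++ [pvLab (pvTuc (line.drop (k.toNat + 2)))]
  else labels

theorem pvStrip_ofList (cl : List Char) :
    PySem.Str.strip (String.ofList cl) = String.ofList (PySem.Chars.strip cl) := by
  simp [PySem.Str.strip]

theorem pvLineA (cl : List Char) (labels : List String) :
    (if PySem.Str.startswith (String.ofList cl) "- [" then
      match PySem.List.pyGet? ((PySem.Str.splitMax? (String.ofList cl) "] " 1).getD []) 1 with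
      | none => labels
      | some after_bracket =>
        match PySem.List.pyGet? ((PySem.Str.split? after_bracket ":").getD []) 0 with
        | none => labels
        | some first => labels ++ [PySem.Str.strip first]
     else labels) = pvProcA cl labels := by
  have hsw : PySem.Str.startswith (String.ofList cl) "- [" = PySem.Chars.startswith cl ['-', ' ', '['] := by
    rw [PySem.Str.startswith_eq]
    simp
  rw [hsw]
  unfold pvProcA pvTuc pvLab
  dsimp only
  by_cases hb : PySem.Chars.startswith cl ['-', ' ', '['] = true
  · rw [if_pos hb, if_pos hb]
    have hsm : PySem.Str.splitMax? (String.ofList cl) "] " 1 =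
        some ((PySem.Chars.splitOnMax cl [']', ' '] 1).map String.ofList) := by
      simp [PySem.Str.splitMax?, PySem.Chars.splitMax?]
    rw [hsm, Option.getD_some, pvSplitOnMax_one [']', ' '] cl (by simp)]
    by_cases hk : PySem.Chars.find cl [']', ' '] = -1
    · rw [if_pos hk, if_pos hk]
      simp [PySem.List.pyGet?, PySem.List.pyIdx?]
    · rw [if_neg hk, if_neg hk]
      rw [show ([']', ' '] : List Char).length = 2 from rfl]
      rw [show ([List.take (PySem.Chars.find cl [']', ' ']).toNat cl,
            List.drop ((PySem.Chars.find cl [']', ' ']).toNat + 2) cl].map String.ofList) =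
          [String.ofList (List.take (PySem.Chars.find cl [']', ' ']).toNat cl),
           String.ofList (List.drop ((PySem.Chars.find cl [']', ' ']).toNat + 2) cl)] from rfl]
      rw [show PySem.List.pyGet? [String.ofList (List.take (PySem.Chars.find cl [']', ' ']).toNat cl),
           String.ofList (List.drop ((PySem.Chars.find cl [']', ' ']).toNat + 2) cl)] 1 =
          some (String.ofList (List.drop ((PySem.Chars.find cl [']', ' ']).toNat + 2) cl)) from by
        simp [PySem.List.pyGet?, PySem.List.pyIdx?]]
      split
      · rename_i heq
        exact absurd heq (by simp)
      rename_i after_bracket heq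
      rw [Option.some_inj] at heq
      subst heq
      -- A's after_bracket.split(":")[0]
      have hsp : PySem.Str.split? (String.ofList (List.drop ((PySem.Chars.find cl [']', ' ']).toNat + 2) cl)) ":" =
          some ((pvSplit [':'] (List.drop ((PySem.Chars.find cl [']', ' ']).toNat + 2) cl)).map String.ofList) := by
        simp [PySem.Str.split?, PySem.Chars.split?]
        rw [pvSplitOn_eq [':'] _ (by simp)]
      rw [hsp, Option.getD_some]
      by_cases hc : PySem.Chars.find (List.drop ((PySem.Chars.find cl [']', ' ']).toNat + 2) cl) [':'] = -1
      · rw [pvSplit_neg [':'] _ hc, if_pos hc]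
        simp only [List.map_cons, List.map_nil]
        rw [show PySem.List.pyGet? [String.ofList (List.drop ((PySem.Chars.find cl [']', ' ']).toNat + 2) cl)] 0 =
            some (String.ofList (List.drop ((PySem.Chars.find cl [']', ' ']).toNat + 2) cl)) from by
          simp [PySem.List.pyGet?, PySem.List.pyIdx?]]
        split
        · rename_i heq
          exact absurd heq (by simp)
        rename_i first heq
        rw [Option.some_inj] at heq
        subst heq
        rw [pvStrip_ofList]
      · rw [pvSplit_pos [':'] _ (by simp) hc, if_neg hc]
        simp only [List.map_cons]
        rw [show ∀ (x : String) (xs : List String), PySem.List.pyGet? (x :: xs) 0 = some x from by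
          intro x xs; simp [PySem.List.pyGet?, PySem.List.pyIdx?]]
        split
        · rename_i heq
          exact absurd heq (by simp)
        rename_i first heq
        rw [Option.some_inj] at heq
        subst heq
        rw [pvStrip_ofList]
  · rw [if_neg hb, if_neg hb]

theorem pvA_eq_fold (mc : String) :
    extract_memory_labels_py mc =
      (pvSplit ['\n'] mc.toList).foldl (fun lab line => pvProcA line lab) [] := by
  unfold extract_memory_labels_py
  have h1 : (PySem.Str.split? mc "\n").getD [] = (pvSplit ['\n'] mc.toList).map String.ofList := by
    simp [PySem.Str.split?, PySem.Chars.split?]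
    rw [pvSplitOn_eq ['\n'] _ (by simp)]
  rw [h1, List.foldl_map]
  congr 1
  funext lab line
  exact pvLineA line lab

-- ---- B-side lemmas: behaviour of the state machine on one newline-free line ----

theorem pvMem_iff_infix (c : Char) (s : List Char) : c ∈ s ↔ [c] <:+: s := by
  constructor
  · intro h
    obtain ⟨p, q, rfl⟩ := List.append_of_mem h
    exact ⟨p, q, by simp⟩
  · rintro ⟨p, q, rfl⟩
    simp

-- state 6 skips to the end of the line
theorem pvB_skip (t : List Char) (hnl : '\n' ∉ t) (buf : List Char) (labels : List String) :
    List.foldl pvStep (6, buf, labels) (t ++ ['\n']) = (0, [], labels) := by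
  induction t with
  | nil => simp [pvStep]
  | cons c t ih =>
    have hc : c ≠ '\n' := by intro h; exact hnl (by simp [h])
    simp only [List.cons_append, List.foldl_cons]
    rw [show pvStep (6, buf, labels) c = (6, buf, labels) by simp [pvStep, hc]]
    exact ih (by intro h; exact hnl (List.mem_cons_of_mem _ h))

-- state 5 collects characters up to the first ':' (or the end of the line)
theorem pvB_collect (t : List Char) (hnl : '\n' ∉ t) (buf : List Char) (labels : List String) :
    List.foldl pvStep (5, buf, labels) (t ++ ['\n']) =
      (0, [], labels ++ [pvLab (buf ++ pvTuc t)]) := by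
  induction t generalizing buf with
  | nil =>
    simp [pvStep, pvTuc, pvLab, pvFind_nil [':'] (by simp)]
  | cons c t ih =>
    have hc : c ≠ '\n' := by intro h; exact hnl (by simp [h])
    have hnt : '\n' ∉ t := by intro h; exact hnl (List.mem_cons_of_mem _ h)
    simp only [List.cons_append, List.foldl_cons]
    by_cases hcc : c = ':'
    · subst hcc
      rw [show pvStep (5, buf, labels) ':' =
          (6, buf, labels ++ [String.ofList (PySem.Chars.strip buf)]) by simp [pvStep]]
      rw [pvB_skip t hnt]
      have hf : PySem.Chars.find (':' :: t) [':'] = 0 := by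
        rw [pvFind_cons [':'] ':' t (by simp)]
        simp [List.isPrefixOf]
      simp [pvTuc, pvLab, hf]
    · rw [show pvStep (5, buf, labels) c = (5, buf ++ [c], labels) by simp [pvStep, hc, hcc]]
      rw [ih hnt (buf ++ [c])]
      have hf := pvFind_cons [':'] c t (by simp)
      rw [show ([':'] : List Char).isPrefixOf (c :: t) = false by
        simp [List.isPrefixOf]; exact fun h => absurd h.symm hcc] at hf
      simp only [Bool.false_eq_true, if_false] at hf
      by_cases hft : PySem.Chars.find t [':'] = -1
      · simp [pvTuc, hf, hft]
      · have hge := PySem.Chars.neg_one_le_find t [':']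
        have hf' : PySem.Chars.find (c :: t) [':'] = PySem.Chars.find t [':'] + 1 := by
          rw [hf, if_neg hft]
        have htn : (PySem.Chars.find t [':'] + 1).toNat = (PySem.Chars.find t [':']).toNat + 1 := by
          omega
        rw [show pvTuc (c :: t) = c :: pvTuc t from by
          unfold pvTuc
          rw [hf', if_neg (by omega), if_neg hft, htn]
          simp]
        simp

-- states 3/4 find the first "] " (state 4 records that the previous char was ']')
theorem pvB_seek (n : Nat) : ∀ (t : List Char), t.length ≤ n → '\n' ∉ t → ∀ (labels : List String),
    (List.foldl pvStep (3, [], labels) (t ++ ['\n']) =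
      (if PySem.Chars.find t [']', ' '] = -1 then (0, [], labels)
       else (0, [], labels ++ [pvLab (pvTuc (t.drop ((PySem.Chars.find t [']', ' ']).toNat + 2)))]))) ∧
    (List.foldl pvStep (4, [], labels) (t ++ ['\n']) =
      (if PySem.Chars.find (']' :: t) [']', ' '] = -1 then (0, [], labels)
       else (0, [], labels ++ [pvLab (pvTuc ((']' :: t).drop ((PySem.Chars.find (']' :: t) [']', ' ']).toNat + 2)))]))) := by
  induction n with
  | zero =>
    intro t ht hnl labels
    have : t = [] := List.eq_nil_of_length_eq_zero (by omega)
    subst this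
    have h1 : PySem.Chars.find ([] : List Char) [']', ' '] = -1 := pvFind_nil _ (by simp)
    have h2 : PySem.Chars.find [']'] [']', ' '] = -1 := by
      rw [pvFind_cons _ ']' [] (by simp)]
      simp [List.isPrefixOf, pvFind_nil ([']', ' '] : List Char) (by simp)]
    constructor <;> simp [pvStep, h1, h2]
  | succ n ih =>
    intro t ht hnl labels
    cases t with
    | nil =>
      have h1 : PySem.Chars.find ([] : List Char) [']', ' '] = -1 := pvFind_nil _ (by simp)
      have h2 : PySem.Chars.find [']'] [']', ' '] = -1 := by
        rw [pvFind_cons _ ']' [] (by simp)]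
        simp [List.isPrefixOf, pvFind_nil ([']', ' '] : List Char) (by simp)]
      constructor <;> simp [pvStep, h1, h2]
    | cons c t =>
      have hc : c ≠ '\n' := by intro h; exact hnl (by simp [h])
      have hnt : '\n' ∉ t := by intro h; exact hnl (List.mem_cons_of_mem _ h)
      have hlen : t.length ≤ n := by simp at ht; omega
      have hge := PySem.Chars.neg_one_le_find t [']', ' ']
      constructor
      · -- state 3
        simp only [List.cons_append, List.foldl_cons]
        by_cases hcc : c = ']'
        · subst hcc
          rw [show pvStep (3, [], labels) ']' = (4, [], labels) by simp [pvStep]]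
          exact (ih t hlen hnt labels).2
        · rw [show pvStep (3, [], labels) c = (3, [], labels) by simp [pvStep, hc, hcc]]
          rw [(ih t hlen hnt labels).1]
          have hf := pvFind_cons [']', ' '] c t (by simp)
          rw [show ([']', ' '] : List Char).isPrefixOf (c :: t) = false by
            simp [List.isPrefixOf]; exact fun h => absurd h.symm hcc] at hf
          simp only [Bool.false_eq_true, if_false] at hf
          by_cases hft : PySem.Chars.find t [']', ' '] = -1
          · simp [hf, hft]
          · rw [if_neg hft, hf, if_neg hft, if_neg (by omega)]
            rw [show (PySem.Chars.find t [']', ' '] + 1).toNat =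
                (PySem.Chars.find t [']', ' ']).toNat + 1 by omega]
            simp
      · -- state 4: previous char was ']'
        simp only [List.cons_append, List.foldl_cons]
        have hge1 := PySem.Chars.neg_one_le_find (']' :: t) [']', ' ']
        by_cases hsp : c = ' '
        · subst hsp
          rw [show pvStep (4, [], labels) ' ' = (5, [], labels) by simp [pvStep]]
          rw [pvB_collect t hnt [] labels]
          have hf : PySem.Chars.find (']' :: ' ' :: t) [']', ' '] = 0 := by
            rw [pvFind_cons _ ']' (' ' :: t) (by simp)]
            simp [List.isPrefixOf]
          rw [hf]
          norm_num
        · by_cases hcc : c = ']'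
          · subst hcc
            rw [show pvStep (4, [], labels) ']' = (4, [], labels) by simp [pvStep]]
            rw [(ih t hlen hnt labels).2]
            have hf := pvFind_cons [']', ' '] ']' (']' :: t) (by simp)
            rw [show ([']', ' '] : List Char).isPrefixOf (']' :: ']' :: t) = false by
              simp [List.isPrefixOf]] at hf
            simp only [Bool.false_eq_true, if_false] at hf
            by_cases hft : PySem.Chars.find (']' :: t) [']', ' '] = -1
            · simp [hf, hft]
            · rw [if_neg hft, hf, if_neg hft, if_neg (by omega)]
              rw [show (PySem.Chars.find (']' :: t) [']', ' '] + 1).toNat =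
                  (PySem.Chars.find (']' :: t) [']', ' ']).toNat + 1 by omega]
              simp
          · rw [show pvStep (4, [], labels) c = (3, [], labels) by
              simp [pvStep, hc, hsp, hcc]]
            rw [(ih t hlen hnt labels).1]
            have hf2 := pvFind_cons [']', ' '] c t (by simp)
            rw [show ([']', ' '] : List Char).isPrefixOf (c :: t) = false by
              simp [List.isPrefixOf]; exact fun h => absurd h.symm hcc] at hf2
            simp only [Bool.false_eq_true, if_false] at hf2
            have hf1 := pvFind_cons [']', ' '] ']' (c :: t) (by simp)
            rw [show ([']', ' '] : List Char).isPrefixOf (']' :: c :: t) = false by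
              simp [List.isPrefixOf]; exact fun h => absurd h.symm hsp] at hf1
            simp only [Bool.false_eq_true, if_false] at hf1
            by_cases hft : PySem.Chars.find t [']', ' '] = -1
            · simp [hf1, hf2, hft]
            · rw [if_neg hft, hf1, hf2, if_neg hft, if_neg (by omega), if_neg (by omega)]
              rw [show (PySem.Chars.find t [']', ' '] + 1 + 1).toNat =
                  (PySem.Chars.find t [']', ' ']).toNat + 2 by omega]
              rw [show (PySem.Chars.find t [']', ' ']).toNat + 2 + 2 =
                  ((PySem.Chars.find t [']', ' ']).toNat + 2) + 1 + 1 by omega]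
              simp

-- one whole newline-free line, from the start state, equals A's per-line processing
theorem pvB_line_main (rest : List Char) (hnr : '\n' ∉ rest) (labels : List String) :
    List.foldl pvStep (0, [], labels) (('-' :: ' ' :: '[' :: rest) ++ ['\n']) =
      (0, [], pvProcA ('-' :: ' ' :: '[' :: rest) labels) := by
  simp only [List.cons_append, List.foldl_cons]
  rw [show pvStep (0, [], labels) '-' = (1, [], labels) by simp [pvStep]]
  rw [show pvStep (1, [], labels) ' ' = (2, [], labels) by simp [pvStep]]
  rw [show pvStep (2, [], labels) '[' = (3, [], labels) by simp [pvStep]]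
  rw [(pvB_seek rest.length rest le_rfl hnr labels).1]
  have hsw : PySem.Chars.startswith ('-' :: ' ' :: '[' :: rest) ['-', ' ', '['] = true := by
    simp [PySem.Chars.startswith, List.isPrefixOf]
  -- shift the "] " search past the three prefix characters, none of which starts "] "
  have hge := PySem.Chars.neg_one_le_find rest [']', ' ']
  have h3 := pvFind_cons [']', ' '] '[' rest (by simp)
  rw [show ([']', ' '] : List Char).isPrefixOf ('[' :: rest) = false by
    simp [List.isPrefixOf]] at h3
  simp only [Bool.false_eq_true, if_false] at h3
  have h2 := pvFind_cons [']', ' '] ' ' ('[' :: rest) (by simp)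
  rw [show ([']', ' '] : List Char).isPrefixOf (' ' :: '[' :: rest) = false by
    simp [List.isPrefixOf]] at h2
  simp only [Bool.false_eq_true, if_false] at h2
  have h1 := pvFind_cons [']', ' '] '-' (' ' :: '[' :: rest) (by simp)
  rw [show ([']', ' '] : List Char).isPrefixOf ('-' :: ' ' :: '[' :: rest) = false by
    simp [List.isPrefixOf]] at h1
  simp only [Bool.false_eq_true, if_false] at h1
  unfold pvProcA
  rw [hsw, if_pos rfl]
  dsimp only
  by_cases hfr : PySem.Chars.find rest [']', ' '] = -1
  · rw [if_pos hfr]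
    rw [show PySem.Chars.find ('-' :: ' ' :: '[' :: rest) [']', ' '] = -1 by
      rw [h1, h2, h3]; simp [hfr]]
    simp
  · rw [if_neg hfr]
    have hfull : PySem.Chars.find ('-' :: ' ' :: '[' :: rest) [']', ' '] =
        PySem.Chars.find rest [']', ' '] + 3 := by
      rw [h1, h2, h3]
      simp only [hfr, if_false]
      rw [if_neg (by omega), if_neg (by omega)]
      ring
    rw [if_neg (by rw [hfull]; omega), hfull]
    rw [show (PySem.Chars.find rest [']', ' '] + 3).toNat + 2 =
        ((PySem.Chars.find rest [']', ' ']).toNat + 2) + 1 + 1 + 1 by omega]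
    simp

theorem pvB_line (l : List Char) (hnl : '\n' ∉ l) (labels : List String) :
    List.foldl pvStep (0, [], labels) (l ++ ['\n']) = (0, [], pvProcA l labels) := by
  cases l with
  | nil => simp [pvStep, pvProcA, PySem.Chars.startswith]
  | cons c t =>
    have hc : c ≠ '\n' := by intro h; exact hnl (by simp [h])
    have hnt : '\n' ∉ t := by intro h; exact hnl (List.mem_cons_of_mem _ h)
    by_cases hc1 : c = '-'
    case neg =>
      simp only [List.cons_append, List.foldl_cons]
      rw [show pvStep (0, [], labels) c = (6, [], labels) by simp [pvStep, hc, hc1]]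
      rw [pvB_skip t hnt]
      rw [show pvProcA (c :: t) labels = labels from by
        unfold pvProcA
        rw [if_neg (by simp [PySem.Chars.startswith, List.isPrefixOf]; intro h; exact absurd h.symm hc1)]]
    case pos =>
      subst hc1
      cases t with
      | nil => simp [pvStep, pvProcA, PySem.Chars.startswith, List.isPrefixOf]
      | cons c2 t2 =>
        have hc2' : c2 ≠ '\n' := by intro h; exact hnt (by simp [h])
        have hnt2 : '\n' ∉ t2 := by intro h; exact hnt (List.mem_cons_of_mem _ h)
        by_cases hc2 : c2 = ' '
        case neg =>
          simp only [List.cons_append, List.foldl_cons]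
          rw [show pvStep (0, [], labels) '-' = (1, [], labels) by simp [pvStep]]
          rw [show pvStep (1, [], labels) c2 = (6, [], labels) by simp [pvStep, hc2', hc2]]
          rw [pvB_skip t2 hnt2]
          rw [show pvProcA ('-' :: c2 :: t2) labels = labels from by
            unfold pvProcA
            rw [if_neg (by simp [PySem.Chars.startswith, List.isPrefixOf]; intro h; exact absurd h.symm hc2)]]
        case pos =>
          subst hc2
          cases t2 with
          | nil => simp [pvStep, pvProcA, PySem.Chars.startswith, List.isPrefixOf]
          | cons c3 t3 =>
            have hc3' : c3 ≠ '\n' := by intro h; exact hnt2 (by simp [h])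
            have hnt3 : '\n' ∉ t3 := by intro h; exact hnt2 (List.mem_cons_of_mem _ h)
            by_cases hc3 : c3 = '['
            case neg =>
              simp only [List.cons_append, List.foldl_cons]
              rw [show pvStep (0, [], labels) '-' = (1, [], labels) by simp [pvStep]]
              rw [show pvStep (1, [], labels) ' ' = (2, [], labels) by simp [pvStep]]
              rw [show pvStep (2, [], labels) c3 = (6, [], labels) by simp [pvStep, hc3', hc3]]
              rw [pvB_skip t3 hnt3]
              rw [show pvProcA ('-' :: ' ' :: c3 :: t3) labels = labels from by
                unfold pvProcA
                rw [if_neg (by simp [PySem.Chars.startswith, List.isPrefixOf]; intro h; exact absurd h.symm hc3)]]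
            case pos =>
              subst hc3
              exact pvB_line_main t3 hnt3 labels

-- the machine over the whole input (with the sentinel newline) folds pvProcA over the lines
theorem pvB_all (n : Nat) : ∀ (s : List Char), s.length ≤ n → ∀ (labels : List String),
    List.foldl pvStep (0, [], labels) (s ++ ['\n']) =
      (0, [], (pvSplit ['\n'] s).foldl (fun lab line => pvProcA line lab) labels) := by
  induction n with
  | zero =>
    intro s hs labels
    have : s = [] := List.eq_nil_of_length_eq_zero (by omega)
    subst this
    rw [pvSplit_nil _ (by simp)]
    simp [pvStep, pvProcA, PySem.Chars.startswith]
  | succ n ih =>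
    intro s hs labels
    by_cases hf : PySem.Chars.find s ['\n'] = -1
    · have hnl : '\n' ∉ s := by
        intro h
        exact (PySem.Chars.find_eq_neg_one_iff s ['\n']).mp hf ((pvMem_iff_infix '\n' s).mp h)
      rw [pvB_line s hnl labels, pvSplit_neg _ _ hf]
      simp
    · have hge := PySem.Chars.neg_one_le_find s ['\n']
      have h0 : 0 ≤ PySem.Chars.find s ['\n'] := by omega
      have hsp := PySem.Chars.find_spec (s := s) (sub := ['\n']) h0
      set j := (PySem.Chars.find s ['\n']).toNat with hj
      obtain ⟨r, hr⟩ := hsp.1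
      have hdropj : s.drop j = '\n' :: s.drop (j + 1) := by
        rw [← hr]
        simp only [List.singleton_append, List.cons.injEq, true_and]
        have : r = (s.drop j).drop 1 := by rw [← hr]; simp
        rw [this, List.drop_drop]
      have hjlt : j < s.length := by
        have := congrArg List.length hdropj
        simp at this
        omega
      have hnl : '\n' ∉ s.take j := by
        intro h
        obtain ⟨p, q, hpq⟩ := List.append_of_mem h
        have hplen : p.length < j := by
          have := congrArg List.length hpq
          simp at this
          have hle : (s.take j).length ≤ j := by simp
          omega
        have hdp : ['\n'] <+: s.drop p.length := by
          have hs' : s = p ++ '\n' :: (q ++ s.drop j) := by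
            conv_lhs => rw [← List.take_append_drop j s]
            rw [hpq]
            simp
          refine ⟨q ++ s.drop j, ?_⟩
          conv_rhs => rw [hs']
          rw [List.drop_left]
          rfl
        exact hsp.2 p.length (by omega) hdp
      have hsplit : s ++ ['\n'] = (s.take j ++ ['\n']) ++ (s.drop (j + 1) ++ ['\n']) := by
        conv_lhs => rw [← List.take_append_drop j s, hdropj]
        simp
      rw [hsplit, List.foldl_append, pvB_line (s.take j) hnl labels]
      rw [ih (s.drop (j + 1)) (by simp; omega) (pvProcA (s.take j) labels)]
      rw [pvSplit_pos ['\n'] s (by simp) hf]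
      simp [← hj]

-- ===== VERDICT (by name: the statement is the Claim_ definition above) =====
theorem extract_memory_labels_py_spec : Claim_equal_extract_memory_labels_py := by
  intro mc _
  unfold Spec_extract_memory_labels_py extract_memory_labels_py_alt
  rw [pvA_eq_fold, pvB_all mc.toList.length mc.toList le_rfl []]
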